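-- pv_equiv track=rewrite | github.com/dani-rr/sqlformatter | sql_formatter.py | as_formatter
-- ===== SOURCE A (Python) =====
-- def as_formatter(asString):
--     if any(' AS ' in string for string in asString):
--         line_str = {}
--         for i in range(1, len(asString)):
--             paren_count = 0
--             found_as_outside = -1
--             j = 0
--             while j < len(asString[i]):
--                 char = asString[i][j]
--                 if char == '(':
--                     paren_count += 1
--                 elif char == ')':
--                     paren_count -= 1
--                 if paren_count == 0 and asString[i][j:j+4] == ' AS ':
--                     found_as_outside = j
--                     break
--                 j += 1
--             line_str[i] = found_as_outside
--         max_position = max(pos for pos in line_str.values() if pos != -1)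
--         for i in range(1, len(asString)):
--             if line_str[i] != -1:
--                 pre_as, post_as = asString[i].rsplit(' AS ', 1)
--                 asString[i] = pre_as + " " * (max_position - len(pre_as)) + ' AS ' + post_as
--     return asString
-- ===== SOURCE B (Python) =====
-- def as_formatter(asString):
--     # Same return value as A; locates the first ' AS ' outside parentheses by
--     # filtering positions with a balanced-prefix test instead of a stateful
--     # character walk, and rebuilds the tail with a comprehension instead of a
--     # dict-indexed loop.  Mutates asString[1:] in place like A does.
--     def locate(line):
--         hits = [j for j in range(len(line))
--                 if line[j:j+4] == ' AS ' and line[:j].count('(') == line[:j].count(')')]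
--         return hits[0] if hits else -1
--
--     positions = [locate(line) for line in asString[1:]]
--     valid = [p for p in positions if p != -1]
--     if not valid:
--         return asString
--     width = max(valid)
--
--     def pad(line):
--         pre, post = line.rsplit(' AS ', 1)
--         return pre + ' ' * (width - len(pre)) + ' AS ' + post
--
--     asString[1:] = [line if p == -1 else pad(line)
--                     for line, p in zip(asString[1:], positions)]
--     return asString
-- ===== Notes on version B (the rewrite author's own statement) =====
-- stated objective: simpler
-- what changed: The stateful per-character paren_count walk with break is replaced by a filter of all ' AS ' positions with a parenthesis-balanced-prefix count test (first hit or -1), the index dict by a list over asString[1:], and the dict-indexed mutation loop by a zip comprehension assigned to asString[1:].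
-- outside the precondition, e.g. on as_formatter(['x AS y']): A raises ValueError, B returns ['x AS y']
import Mathlib
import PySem

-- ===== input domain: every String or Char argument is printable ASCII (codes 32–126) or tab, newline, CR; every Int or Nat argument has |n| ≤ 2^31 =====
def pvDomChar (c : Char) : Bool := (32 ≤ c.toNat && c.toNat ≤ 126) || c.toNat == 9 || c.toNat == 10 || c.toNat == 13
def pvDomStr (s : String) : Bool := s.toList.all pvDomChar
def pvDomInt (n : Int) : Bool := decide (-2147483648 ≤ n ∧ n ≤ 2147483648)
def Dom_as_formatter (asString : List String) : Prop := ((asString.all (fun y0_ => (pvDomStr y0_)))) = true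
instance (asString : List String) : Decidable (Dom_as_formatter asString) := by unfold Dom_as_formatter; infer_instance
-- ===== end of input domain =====

-- B replaces A's stateful paren_count character walk by a filter of all ' AS ' positions with a
-- balanced-prefix test, and rebuilds the tail by a comprehension instead of a dict-indexed loop
-- (objective: simpler).  Both A and B mutate asString in place in Python; the equivalence proved
-- here is about the RETURN value.

-- ===== PORT A =====
-- the while loop walking j with a running paren_count, breaking at the first ' AS ' at depth 0
def aScan (s : List Char) (j : Nat) (paren : Int) : Int :=
  if h : j < s.length then
    let c := s[j]
    let paren' := if c = '(' then paren + 1 else if c = ')' then paren - 1 else paren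
    if paren' = 0 ∧ PySem.List.slice s (some (j : Int)) (some ((j : Int) + 4)) = " AS ".toList then
      (j : Int)
    else aScan s (j + 1) paren'
  else -1
termination_by s.length - j

-- pre_as, post_as = line.rsplit(' AS ', 1): ported via rfind, exact whenever ' AS ' occurs in line
-- (guaranteed where A calls it); then pre + ' ' * (max_position - len(pre)) + ' AS ' + post
def aPad (maxPos : Int) (line : List Char) : List Char :=
  let r := (PySem.Chars.rfind line " AS ".toList).toNat
  line.take r ++ List.replicate (maxPos - (r : Int)).toNat ' ' ++ " AS ".toList ++ line.drop (r + 4)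

def as_formatter (asString : List String) : List String :=
  if asString.any (fun s => PySem.Str.isIn " AS " s) then
    let lineStr : PySem.Dict Int Int :=
      (PySem.List.pyRange 1 (asString.length : Int) 1).foldl
        (fun d i => d.insert i (aScan (PySem.List.pyGetD asString i "").toList 0 0))
        PySem.Dict.empty
    match PySem.List.max? (lineStr.values.filter (fun p => p != -1)) (fun p => p) with
    | none => asString   -- Python raises ValueError here (max of an empty sequence); excluded by Pre_
    | some maxPos =>
      (PySem.List.pyRange 1 (asString.length : Int) 1).foldl
        (fun acc i =>
          if lineStr.getD i (-1) != -1 then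
            acc.set i.toNat (String.ofList (aPad maxPos (PySem.List.pyGetD acc i "").toList))
          else acc)
        asString
  else asString

-- ===== PORT B =====
-- first ' AS ' whose prefix is parenthesis-balanced, as a filter over all positions
-- (str.count of a single-character pattern is exactly the character count)
def bLocate (s : List Char) : Int :=
  let hits := (List.range s.length).filter (fun (j : Nat) =>
    (PySem.List.slice s (some (j : Int)) (some ((j : Int) + 4)) == " AS ".toList)
    && ((s.take j).count '(' == (s.take j).count ')'))
  match hits.head? with
  | some j => (j : Int)
  | none => -1

-- pre, post = line.rsplit(' AS ', 1): via rfind, exact since ' AS ' occurs in line where B calls it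
def bPad (width : Int) (line : List Char) : List Char :=
  let r := (PySem.Chars.rfind line " AS ".toList).toNat
  line.take r ++ List.replicate (width - (r : Int)).toNat ' ' ++ " AS ".toList ++ line.drop (r + 4)

def as_formatter_alt (asString : List String) : List String :=
  let positions := (asString.drop 1).map (fun line => bLocate line.toList)
  match PySem.List.max? (positions.filter (fun p => p != -1)) (fun p => p) with
  | none => asString   -- 'if not valid: return asString'
  | some width =>
      asString.take 1 ++ ((asString.drop 1).zip positions).map
        (fun lp => if lp.2 == (-1 : Int) then lp.1 else String.ofList (bPad width lp.1.toList))

-- ===== PRECONDITION & SPEC =====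
-- Pre_ excludes exactly the inputs on which Python A raises ValueError (max() of an empty
-- sequence): some line contains ' AS ' but no line after the first has an ' AS ' at
-- parenthesis-balanced depth.
def Pre_as_formatter (asString : List String) : Prop :=
  (asString.all (fun s => !(PySem.Str.isIn " AS " s))) = true ∨
  ((asString.drop 1).any (fun line =>
    (List.range line.toList.length).any (fun (j : Nat) =>
      (PySem.List.slice line.toList (some (j : Int)) (some ((j : Int) + 4)) == " AS ".toList)
      && ((line.toList.take j).count '(' == (line.toList.take j).count ')')))) = true
instance (asString : List String) : Decidable (Pre_as_formatter asString) := by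
  unfold Pre_as_formatter; infer_instance

def pvWitness_as_formatter : List String := ["SELECT", "a AS b", "cc AS d"]

def Spec_as_formatter (asString : List String) (out : List String) : Prop :=
  out = as_formatter_alt asString
instance (asString : List String) (out : List String) : Decidable (Spec_as_formatter asString out) := by
  unfold Spec_as_formatter; infer_instance

-- ===== CLAIM (what is proved, stated in full; the proofs are below) =====
def Claim_equal_as_formatter : Prop := ∀ (asString : List String), Dom_as_formatter asString → Pre_as_formatter asString → Spec_as_formatter asString (as_formatter asString)

-- ===== LEMMAS AND PROOFS =====

def pvPred (s : List Char) (j : Nat) : Bool :=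
  (PySem.List.slice s (some (j : Int)) (some ((j : Int) + 4)) == " AS ".toList)
  && ((s.take j).count '(' == (s.take j).count ')')

lemma pred_char (s : List Char) (j : Nat) (hj : j < s.length)
    (h : PySem.List.slice s (some (j : Int)) (some ((j : Int) + 4)) = " AS ".toList) :
    s[j] = ' ' := by
  have hs : PySem.List.slice s (some (j:Int)) (some ((j:Int)+4)) = (s.drop j).take 4 := by
    exact_mod_cast PySem.List.slice_natCast_add s j 4
  have h2 : (s[j] :: (s.drop (j+1)).take 3).head? = (" AS ".toList).head? := by
    rw [← List.take_succ_cons, ← List.drop_eq_getElem_cons hj, ← hs, h]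
  have h3 : (" AS ".toList).head? = some ' ' := rfl
  rw [h3] at h2
  simpa using h2

lemma scan_eq_aux (s : List Char) : ∀ (n j : Nat) (c : Int), s.length - j = n →
    c = ((s.take j).count '(' : Int) - ((s.take j).count ')' : Int) →
    aScan s j c = (match ((List.range' j n).filter (pvPred s)).head? with
                   | some k => (k : Int) | none => -1) := by
  intro n
  induction n with
  | zero =>
    intro j c hn hc
    rw [aScan, dif_neg (by omega)]
    simp
  | succ m ih =>
    intro j c hn hc
    have hj : j < s.length := by omega
    have hs : PySem.List.slice s (some (j:Int)) (some ((j:Int)+4)) = (s.drop j).take 4 := by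
      exact_mod_cast PySem.List.slice_natCast_add s j 4
    have htake : s.take (j+1) = s.take j ++ [s[j]] := by
      rw [List.take_add_one]; simp [List.getElem?_eq_getElem hj]
    rw [aScan, dif_pos hj]
    rw [List.range'_succ, List.filter_cons]
    by_cases hp : pvPred s j = true
    · have hmatch : PySem.List.slice s (some (j:Int)) (some ((j:Int)+4)) = " AS ".toList := by
        simp [pvPred] at hp; exact hp.1
      have hcount : (s.take j).count '(' = (s.take j).count ')' := by
        simp [pvPred] at hp; exact hp.2
      have hc0 : c = 0 := by rw [hc, hcount]; ring
      have hch : s[j] = ' ' := pred_char s j hj hmatch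
      simp only [hp, if_pos]
      rw [if_pos]
      · simp
      · refine ⟨?_, hmatch⟩
        rw [hch, if_neg (by decide), if_neg (by decide), hc0]
    · simp only [hp]
      rw [if_neg]
      · -- recurse
        have hinv : (if s[j] = '(' then c + 1 else if s[j] = ')' then c - 1 else c)
            = ((s.take (j+1)).count '(' : Int) - ((s.take (j+1)).count ')' : Int) := by
          subst hc
          rw [htake]
          simp only [List.count_append, List.count_cons, List.count_nil]
          by_cases h1 : s[j] = '('
          · rw [if_pos h1]
            simp [h1]
            ring
          · by_cases h2 : s[j] = ')'
            · rw [if_neg h1, if_pos h2]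
              simp [h2]
              ring
            · rw [if_neg h1, if_neg h2]
              simp [h1, h2]
        rw [ih (j+1) _ (by omega) hinv]
        simp
      · -- A's condition is false
        intro hcond
        obtain ⟨hz, hm⟩ := hcond
        have hch : s[j] = ' ' := pred_char s j hj hm
        rw [hch, if_neg (by decide), if_neg (by decide)] at hz
        apply hp
        have hcnt : (s.take j).count '(' = (s.take j).count ')' := by
          rw [hc] at hz; omega
        simp [pvPred, hm, hcnt]

lemma bLocate_eq_aScan (s : List Char) : bLocate s = aScan s 0 0 := by
  rw [scan_eq_aux s s.length 0 0 (by omega) (by simp)]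
  unfold bLocate
  rw [List.range_eq_range']
  rfl

lemma pred_infix (s : List Char) (j : Nat)
    (h : PySem.List.slice s (some (j : Int)) (some ((j : Int) + 4)) = " AS ".toList) :
    " AS ".toList <:+: s := by
  have hs : PySem.List.slice s (some (j:Int)) (some ((j:Int)+4)) = (s.drop j).take 4 := by
    exact_mod_cast PySem.List.slice_natCast_add s j 4
  rw [hs] at h
  exact ⟨s.take j, (s.drop j).drop 4, by rw [← h]; simp⟩

lemma bLocate_neg_one (s : List Char) (h : PySem.Chars.isIn " AS ".toList s = false) :
    bLocate s = -1 := by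
  unfold bLocate
  have hnil : (List.range s.length).filter (fun (j : Nat) =>
      (PySem.List.slice s (some (j : Int)) (some ((j : Int) + 4)) == " AS ".toList)
      && ((s.take j).count '(' == (s.take j).count ')')) = [] := by
    rw [List.filter_eq_nil_iff]
    intro j _ hj
    simp only [Bool.and_eq_true, beq_iff_eq] at hj
    have hinf := pred_infix s j hj.1
    rw [PySem.Chars.isIn_eq_false_iff] at h
    exact absurd hinf h
  rw [hnil]
  exact rfl

def pvUpd (d : PySem.Dict Int Int) (mp : Int) (acc : List String) (i : Int) : List String :=
  if d.getD i (-1) != -1 then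
    acc.set i.toNat (String.ofList (aPad mp (PySem.List.pyGetD acc i "").toList))
  else acc

lemma loop_getElem? (xs : List String) (d : PySem.Dict Int Int) (mp : Int) :
    ∀ (m : Nat), m ≤ xs.length →
      ((PySem.List.pyRange 1 (m : Int)).foldl (pvUpd d mp) xs).length = xs.length ∧
      ∀ (k : Nat),
        ((PySem.List.pyRange 1 (m : Int)).foldl (pvUpd d mp) xs)[k]? =
          if 1 ≤ k ∧ k < m ∧ d.getD (k : Int) (-1) ≠ -1
          then (xs[k]?).map (fun t => String.ofList (aPad mp t.toList)) else xs[k]? := by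
  intro m
  induction m with
  | zero =>
    intro _
    rw [PySem.List.pyRange_one_eq_nil (by norm_num)]
    refine ⟨rfl, fun k => ?_⟩
    rw [if_neg (by omega)]
    rfl
  | succ m ih =>
    intro hm
    by_cases hm0 : m = 0
    · subst hm0
      rw [show ((1 : Nat) : Int) = 1 by norm_num, PySem.List.pyRange_one_eq_nil le_rfl]
      refine ⟨rfl, fun k => ?_⟩
      rw [if_neg (by omega)]
      rfl
    · have h1m : (1 : Int) ≤ (m : Nat) := by exact_mod_cast Nat.one_le_iff_ne_zero.mpr hm0
      obtain ⟨ihl, ihe⟩ := ih (by omega)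
      rw [show (((m + 1 : Nat)) : Int) = (m : Int) + 1 by push_cast; ring,
        PySem.List.pyRange_one_succ_right h1m, List.foldl_append]
      simp only [List.foldl_cons, List.foldl_nil]
      set R := (PySem.List.pyRange 1 (m : Int)).foldl (pvUpd d mp) xs with hR
      have hRm : R[m]? = xs[m]? := by rw [ihe m, if_neg (by omega)]
      by_cases hd : d.getD (m : Int) (-1) = -1
      · rw [show pvUpd d mp R (m : Int) = R by simp [pvUpd, hd]]
        refine ⟨ihl, fun k => ?_⟩
        rw [ihe k]
        by_cases hk : k = m
        · subst hk; rw [if_neg (by omega), if_neg (by omega)]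
        · by_cases hc : 1 ≤ k ∧ k < m ∧ d.getD (k : Int) (-1) ≠ -1
          · rw [if_pos hc, if_pos ⟨hc.1, by omega, hc.2.2⟩]
          · rw [if_neg hc, if_neg (by intro h2; exact hc ⟨h2.1, by omega, h2.2.2⟩)]
      · have hup : pvUpd d mp R (m : Int) =
            R.set m (String.ofList (aPad mp (PySem.List.pyGetD R (m : Int) "").toList)) := by
          simp [pvUpd, hd]
        rw [hup]
        have hmlt : m < xs.length := by omega
        have hRget : PySem.List.pyGetD R (m : Int) "" = xs[m] := by
          rw [PySem.List.pyGetD_natCast]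
          have : R.getD m "" = xs.getD m "" := by
            rw [List.getD_eq_getElem?_getD, List.getD_eq_getElem?_getD, hRm]
          rw [this, List.getD_eq_getElem?_getD, List.getElem?_eq_getElem hmlt]
          rfl
        refine ⟨by rw [List.length_set, ihl], fun k => ?_⟩
        by_cases hk : k = m
        · subst hk
          rw [List.getElem?_set_self' ]
          rw [hRm, if_pos ⟨by omega, by omega, hd⟩, hRget]
          rw [List.getElem?_eq_getElem hmlt]
          rfl
        · rw [List.getElem?_set_ne (by omega), ihe k]
          by_cases hc : 1 ≤ k ∧ k < m ∧ d.getD (k : Int) (-1) ≠ -1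
          · rw [if_pos hc, if_pos ⟨hc.1, by omega, hc.2.2⟩]
          · rw [if_neg hc, if_neg (by intro h2; exact hc ⟨h2.1, by omega, h2.2.2⟩)]

lemma pad_eq : bPad = aPad := rfl

theorem ports_agree (xs : List String) : as_formatter xs = as_formatter_alt xs := by
  simp only [as_formatter, as_formatter_alt]
  set P := (xs.drop 1).map (fun line => bLocate line.toList) with hP
  have hitems : ((PySem.List.pyRange 1 (xs.length : Int) 1).foldl
      (fun d i => d.insert i (aScan (PySem.List.pyGetD xs i "").toList 0 0))
      PySem.Dict.empty).items =
      (PySem.List.pyRange 1 (xs.length : Int) 1).map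
        (fun i => (i, aScan (PySem.List.pyGetD xs i "").toList 0 0)) := by
    have h := PySem.Dict.items_foldl_insert_fresh (PySem.List.pyRange 1 (xs.length : Int) 1)
      (fun i => i) (fun i => aScan (PySem.List.pyGetD xs i "").toList 0 0) PySem.Dict.empty
      (fun a _ => by simp) (by simpa using PySem.List.nodup_pyRange_one 1 (xs.length : Int))
    simpa using h
  set D := ((PySem.List.pyRange 1 (xs.length : Int) 1).foldl
      (fun d i => d.insert i (aScan (PySem.List.pyGetD xs i "").toList 0 0))
      PySem.Dict.empty) with hD
  have hnodup : D.keys.Nodup := by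
    simp only [PySem.Dict.keys, hitems, List.map_map]
    rw [show ((fun x : Int × Int => x.1) ∘ (fun i : Int => (i, aScan (PySem.List.pyGetD xs i "").toList 0 0))) = fun i => i from rfl, List.map_id']
    exact PySem.List.nodup_pyRange_one 1 (xs.length : Int)
  have hvals : D.values = P := by
    simp only [PySem.Dict.values, hitems, List.map_map]
    rw [show ((fun p : Int × Int => p.2) ∘ (fun i => (i, aScan (PySem.List.pyGetD xs i "").toList 0 0)))
        = ((fun t : String => aScan t.toList 0 0) ∘ (fun i => PySem.List.pyGetD xs i "")) from rfl,
      ← List.map_map, PySem.List.map_pyGetD_pyRange' xs "" (by norm_num)]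
    rw [hP, show ((1:Int)).toNat = 1 from rfl]
    exact List.map_congr_left (fun line _ => (bLocate_eq_aScan line.toList).symm)
  have hget : ∀ k : Nat, 1 ≤ k → (h2 : k < xs.length) →
      D.getD (k : Int) (-1) = aScan (xs[k]).toList 0 0 := by
    intro k h1 h2
    have hmem : ((k : Int), aScan (PySem.List.pyGetD xs (k : Int) "").toList 0 0) ∈ D.items := by
      rw [hitems]
      exact List.mem_map.mpr ⟨(k : Int), PySem.List.mem_pyRange_one.mpr (by omega), rfl⟩
    have := PySem.Dict.getD_of_mem_items D hmem hnodup (-1)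
    rw [this]
    congr 1
    rw [PySem.List.pyGetD_natCast, List.getD_eq_getElem?_getD, List.getElem?_eq_getElem h2]
    rfl
  by_cases hany : xs.any (fun s => PySem.Str.isIn " AS " s) = true
  · rw [if_pos hany, hvals]
    rcases hmax : PySem.List.max? (P.filter (fun p => p != -1)) (fun p => p) with _ | mp
    · rfl
    · -- padding pass
      dsimp only
      have hne : xs ≠ [] := by
        intro h; subst h; simp at hany
      have hlen0 : 0 < xs.length := List.length_pos_iff.mpr hne
      have hlen1 : (xs.take 1).length = 1 := by
        rw [List.length_take]; omega
      have hPlen : P.length = xs.length - 1 := by rw [hP]; simp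
      have hzlen : ((xs.drop 1).zip P).length = xs.length - 1 := by
        rw [List.length_zip, hPlen]; simp
      have hloop := loop_getElem? xs D mp xs.length le_rfl
      rw [show (fun (acc : List String) (i : Int) =>
            if D.getD i (-1) != -1 then
              acc.set i.toNat (String.ofList (aPad mp (PySem.List.pyGetD acc i "").toList))
            else acc) = pvUpd D mp from rfl]
      apply List.ext_getElem?
      intro k
      rw [hloop.2 k, List.getElem?_append, hlen1]
      by_cases hk0 : k = 0
      · subst hk0
        rw [if_neg (by omega), if_pos (by omega), List.getElem?_take, if_pos (by omega)]
      · have hk1 : 1 ≤ k := by omega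
        rw [if_neg (show ¬ k < 1 by omega), List.getElem?_map]
        by_cases hklen : k < xs.length
        · have hkz : k - 1 < ((xs.drop 1).zip P).length := by omega
          rw [List.getElem?_eq_getElem hkz, List.getElem_zip]
          have hd1 : k - 1 < (xs.drop 1).length := by simp; omega
          have hdrop : (xs.drop 1)[k - 1] = xs[k] := by
            rw [List.getElem_drop]
            congr 1
            omega
          have hPk : P[k - 1]'(by omega) = bLocate (xs[k]'hklen).toList := by
            simp only [hP, List.getElem_map, hdrop]
          have hDk : D.getD (k : Int) (-1) = bLocate (xs[k]'hklen).toList := by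
            rw [hget k hk1 hklen, bLocate_eq_aScan]
          simp only [Option.map_some, hdrop, hPk]
          by_cases hb : bLocate (xs[k]'hklen).toList = -1
          · rw [if_neg (by rw [hDk]; simp [hb]), List.getElem?_eq_getElem hklen]
            simp [hb]
          · rw [if_pos ⟨hk1, hklen, by rw [hDk]; exact hb⟩, List.getElem?_eq_getElem hklen]
            simp only [Option.map_some]
            rw [if_neg (by simpa using hb), pad_eq]
        · rw [List.getElem?_eq_none (by omega), List.getElem?_eq_none (by omega)]
          rw [if_neg (by omega)]
          rfl
  · rw [if_neg hany]
    have hnin : ∀ s ∈ xs, PySem.Str.isIn " AS " s = false := by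
      simpa using List.any_eq_false.mp (Bool.of_not_eq_true hany)
    have hPnil : P.filter (fun p => p != -1) = [] := by
      rw [List.filter_eq_nil_iff]
      intro p hpmem
      rw [hP] at hpmem
      obtain ⟨line, hline, rfl⟩ := List.mem_map.mp hpmem
      have h0 := hnin line (List.mem_of_mem_drop hline)
      rw [bLocate_neg_one line.toList (by simpa using h0)]
      simp
    rw [hPnil]
    rfl

-- ===== VERDICT (by name: the statement is the Claim_ definition above) =====
theorem as_formatter_spec : Claim_equal_as_formatter := by
  intro asString _ _
  unfold Spec_as_formatter
  exact ports_agree asString
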